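-- pv_equiv track=rewrite | github.com/waren23greg-stack/MISTCODER | covenant_engine.py | build_compliance
-- ===== SOURCE A (Python) =====
-- CWE_OWASP = {
--     "CWE-89": "A03:Injection","CWE-94":"A03:Injection","CWE-22":"A01:Broken Access Control",
--     "CWE-327":"A02:Cryptographic Failures","CWE-798":"A07:Identification Failures",
--     "CWE-502":"A08:Software Data Integrity","CWE-78":"A03:Injection",
--     "CWE-20":"A03:Injection","CWE-200":"A01:Broken Access Control",
-- }
--
-- CWE_TOP25 = {
--     "CWE-89":1,"CWE-79":2,"CWE-78":6,"CWE-22":8,"CWE-94":28,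
--     "CWE-502":23,"CWE-327":0,"CWE-798":19,
-- }
--
-- def build_compliance(findings: list) -> dict:
--     owasp_hits: dict[str,int] = {}
--     cwe_hits: dict[str,int]   = {}
--     for f in findings:
--         cwe = f.get("cwe","") or f.get("cwe_id","")
--         if cwe:
--             cwe_hits[cwe] = cwe_hits.get(cwe,0) + 1
--             cat = CWE_OWASP.get(cwe)
--             if cat: owasp_hits[cat] = owasp_hits.get(cat,0) + 1
--     top25_hits = {k:v for k,v in cwe_hits.items() if k in CWE_TOP25}
--     return {"owasp": owasp_hits, "cwe": cwe_hits, "top25": top25_hits}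
-- ===== SOURCE B (Python) =====
-- CWE_OWASP = {
--     "CWE-89": "A03:Injection","CWE-94":"A03:Injection","CWE-22":"A01:Broken Access Control",
--     "CWE-327":"A02:Cryptographic Failures","CWE-798":"A07:Identification Failures",
--     "CWE-502":"A08:Software Data Integrity","CWE-78":"A03:Injection",
--     "CWE-20":"A03:Injection","CWE-200":"A01:Broken Access Control",
-- }
--
-- CWE_TOP25 = {
--     "CWE-89":1,"CWE-79":2,"CWE-78":6,"CWE-22":8,"CWE-94":28,
--     "CWE-502":23,"CWE-327":0,"CWE-798":19,
-- }
--
-- def build_compliance(findings: list) -> dict: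
--     # pass 1: just collect the non-empty CWE ids, in order
--     cwes = []
--     for f in findings:
--         c = f.get("cwe", "") or f.get("cwe_id", "")
--         if c:
--             cwes.append(c)
--     # distinct-key count table (comprehension keeps first-occurrence order)
--     cwe_hits = {c: cwes.count(c) for c in cwes}
--     # pass 2: derive OWASP categories from the count table, adding stored counts
--     owasp_hits: dict[str, int] = {}
--     for c, n in cwe_hits.items():
--         cat = CWE_OWASP.get(c)
--         if cat is not None:
--             owasp_hits[cat] = owasp_hits.get(cat, 0) + n
--     top25_hits = {c: n for c, n in cwe_hits.items() if c in CWE_TOP25}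
--     return {"owasp": owasp_hits, "cwe": cwe_hits, "top25": top25_hits}
-- ===== Notes on version B (the rewrite author's own statement) =====
-- stated objective: alternative
-- what changed: A tallies cwe and owasp counters together in one loop per finding; B first collects the cwe ids, builds the count table as a comprehension over them, then derives owasp_hits in a separate pass over the distinct-key count table adding each stored count, and filters top25 from that table.
import Mathlib
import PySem

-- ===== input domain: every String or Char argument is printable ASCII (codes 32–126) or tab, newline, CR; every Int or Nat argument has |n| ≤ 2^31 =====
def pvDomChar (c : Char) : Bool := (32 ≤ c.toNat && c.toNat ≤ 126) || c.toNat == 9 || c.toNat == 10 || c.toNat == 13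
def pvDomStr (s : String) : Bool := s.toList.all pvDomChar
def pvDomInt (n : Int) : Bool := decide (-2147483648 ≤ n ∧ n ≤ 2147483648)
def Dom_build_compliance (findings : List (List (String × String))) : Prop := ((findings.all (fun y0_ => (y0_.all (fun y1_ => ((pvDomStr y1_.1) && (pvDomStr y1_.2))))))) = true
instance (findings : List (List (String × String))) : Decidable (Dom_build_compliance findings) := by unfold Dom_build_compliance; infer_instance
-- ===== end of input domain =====

-- B replaces A's single combined tally loop by: collect the cwe ids, build the count table as a
-- comprehension over them, then derive owasp from the stored counts in a second pass (alternative decomposition).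


-- ===== PORT A =====
def CWE_OWASP : PySem.Dict String String := PySem.Dict.ofList [
  ("CWE-89", "A03:Injection"), ("CWE-94", "A03:Injection"), ("CWE-22", "A01:Broken Access Control"),
  ("CWE-327", "A02:Cryptographic Failures"), ("CWE-798", "A07:Identification Failures"),
  ("CWE-502", "A08:Software Data Integrity"), ("CWE-78", "A03:Injection"),
  ("CWE-20", "A03:Injection"), ("CWE-200", "A01:Broken Access Control")]

def CWE_TOP25 : PySem.Dict String Int := PySem.Dict.ofList [
  ("CWE-89", 1), ("CWE-79", 2), ("CWE-78", 6), ("CWE-22", 8), ("CWE-94", 28),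
  ("CWE-502", 23), ("CWE-327", 0), ("CWE-798", 19)]

-- f.get("cwe","") or f.get("cwe_id","")   (identical line in both Pythons)
def pyGetCwe (f : List (String × String)) : String :=
  let g1 := (PySem.Dict.ofList f).getD "cwe" ""
  if g1 ≠ "" then g1 else (PySem.Dict.ofList f).getD "cwe_id" ""

-- A's loop body: update (owasp_hits, cwe_hits) with one finding
def aStep (st : PySem.Dict String Int × PySem.Dict String Int) (f : List (String × String)) :
    PySem.Dict String Int × PySem.Dict String Int :=
  let cwe := pyGetCwe f
  if cwe ≠ "" then
    let cweh := st.2.insert cwe (st.2.getD cwe 0 + 1)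
    match CWE_OWASP.get? cwe with
    | some cat => if cat ≠ "" then (st.1.insert cat (st.1.getD cat 0 + 1), cweh) else (st.1, cweh)
    | none => (st.1, cweh)
  else st

def build_compliance (findings : List (List (String × String))) : List (String × List (String × Int)) :=
  let st := findings.foldl aStep (PySem.Dict.empty, PySem.Dict.empty)
  let top25 := st.2.items.filter (fun kv => CWE_TOP25.contains kv.1)
  [("owasp", st.1.items), ("cwe", st.2.items), ("top25", top25)]

-- ===== PORT B =====
-- B's second pass: add the stored count of one distinct cwe to its OWASP category
def bOwaspStep (o : PySem.Dict String Int) (kv : String × Int) : PySem.Dict String Int :=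
  match CWE_OWASP.get? kv.1 with
  | some cat => o.insert cat (o.getD cat 0 + kv.2)
  | none => o

def build_compliance_alt (findings : List (List (String × String))) : List (String × List (String × Int)) :=
  let cwes := findings.foldl (fun (acc : List String) (f : List (String × String)) =>
      let c := pyGetCwe f
      if c ≠ "" then acc ++ [c] else acc) []
  let cwe_hits := cwes.foldl (fun (d : PySem.Dict String Int) c =>
      d.insert c ((cwes.count c : Nat) : Int)) PySem.Dict.empty
  let owasp_hits := cwe_hits.items.foldl bOwaspStep PySem.Dict.empty
  let top25 := cwe_hits.items.foldl (fun acc (kv : String × Int) =>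
      if CWE_TOP25.contains kv.1 then acc ++ [kv] else acc) []
  [("owasp", owasp_hits.items), ("cwe", cwe_hits.items), ("top25", top25)]

-- ===== PRECONDITION & SPEC =====
def Spec_build_compliance (findings : List (List (String × String))) (out : List (String × List (String × Int))) : Prop := out = build_compliance_alt findings
instance (findings : List (List (String × String))) (out : List (String × List (String × Int))) : Decidable (Spec_build_compliance findings out) := by unfold Spec_build_compliance; infer_instance

-- ===== CLAIM (what is proved, stated in full; the proofs are below) =====
def Claim_equal_build_compliance : Prop := ∀ (findings : List (List (String × String))), Dom_build_compliance findings → Spec_build_compliance findings (build_compliance findings)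

-- ===== LEMMAS AND PROOFS =====

-- proof-side names: "derive d" is B's second pass run on a count table d; "bump"/"cstep" is A's cwe update
def derive (d : PySem.Dict String Int) : PySem.Dict String Int := d.items.foldl bOwaspStep PySem.Dict.empty
def bump (d : PySem.Dict String Int) (c : String) : PySem.Dict String Int := d.insert c (d.getD c 0 + 1)
def cstep (d : PySem.Dict String Int) (f : List (String × String)) : PySem.Dict String Int :=
  if pyGetCwe f ≠ "" then bump d (pyGetCwe f) else d
def colStep (acc : List String) (f : List (String × String)) : List String :=
  let c := pyGetCwe f
  if c ≠ "" then acc ++ [c] else acc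

lemma owasp_val_ne (c cat : String) (h : CWE_OWASP.get? c = some cat) : cat ≠ "" := by
  have e : CWE_OWASP = PySem.Dict.mk [
    ("CWE-89", "A03:Injection"), ("CWE-94", "A03:Injection"), ("CWE-22", "A01:Broken Access Control"),
    ("CWE-327", "A02:Cryptographic Failures"), ("CWE-798", "A07:Identification Failures"),
    ("CWE-502", "A08:Software Data Integrity"), ("CWE-78", "A03:Injection"),
    ("CWE-20", "A03:Injection"), ("CWE-200", "A01:Broken Access Control")] := by decide
  rw [e] at h
  simp only [PySem.Dict.get?_mk_cons] at h
  split_ifs at h <;>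
    first
      | (simp only [Option.some.injEq] at h; rw [← h]; decide)
      | simp [PySem.Dict.get?] at h

lemma nodup_foldl_bOwaspStep (l : List (String × Int)) :
    ∀ o : PySem.Dict String Int, o.keys.Nodup → (l.foldl bOwaspStep o).keys.Nodup := by
  induction l with
  | nil => intro o h; simpa using h
  | cons p t ih =>
    intro o h
    simp only [List.foldl_cons]
    apply ih
    cases hg : CWE_OWASP.get? p.1 with
    | none => simp only [bOwaspStep, hg]; exact h
    | some cat => simp only [bOwaspStep, hg]; exact PySem.Dict.nodup_keys_insert _ _ _ h

lemma dict_eq_of (d1 d2 : PySem.Dict String Int) (hk : d1.keys = d2.keys)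
    (hnd : d1.keys.Nodup) (hg : ∀ k, d1.getD k 0 = d2.getD k 0) : d1 = d2 := by
  apply PySem.Dict.ext
  rw [PySem.Dict.items_eq_map_keys d1 hnd 0, PySem.Dict.items_eq_map_keys d2 (hk ▸ hnd) 0, hk]
  exact List.map_congr_left fun k _ => by rw [hg k]

-- R-transfer: two accumulators differing by +1 at an existing key stay so through B's second pass
lemma R_fold (l : List (String × Int)) :
    ∀ (o1 o2 : PySem.Dict String Int) (cat : String), o1.keys = o2.keys → o1.keys.Nodup →
      cat ∈ o1.keys → (∀ k, o2.getD k 0 = o1.getD k 0 + (if k = cat then 1 else 0)) →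
      (l.foldl bOwaspStep o1).keys = (l.foldl bOwaspStep o2).keys ∧
      (l.foldl bOwaspStep o1).keys.Nodup ∧ cat ∈ (l.foldl bOwaspStep o1).keys ∧
      ∀ k, (l.foldl bOwaspStep o2).getD k 0 = (l.foldl bOwaspStep o1).getD k 0 + (if k = cat then 1 else 0) := by
  induction l with
  | nil => intro o1 o2 cat hk hnd hm hg; exact ⟨hk, hnd, hm, hg⟩
  | cons p t ih =>
    intro o1 o2 cat hk hnd hm hg
    simp only [List.foldl_cons]
    cases hcat : CWE_OWASP.get? p.1 with
    | none => simp only [bOwaspStep, hcat]; exact ih o1 o2 cat hk hnd hm hg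
    | some c' =>
      simp only [bOwaspStep, hcat]
      apply ih
      · by_cases hc : o1.contains c' = true
        · have hc2 : o2.contains c' = true := by
            rw [PySem.Dict.contains_eq_decide_mem_keys] at hc ⊢
            rw [← hk]; exact hc
          rw [PySem.Dict.keys_insert_of_contains _ _ hc, PySem.Dict.keys_insert_of_contains _ _ hc2, hk]
        · have hc1 : o1.contains c' = false := by simpa using hc
          have hc2 : o2.contains c' = false := by
            rw [PySem.Dict.contains_eq_decide_mem_keys] at hc1 ⊢
            rw [← hk]; exact hc1
          rw [PySem.Dict.keys_insert_of_not_contains _ _ hc1, PySem.Dict.keys_insert_of_not_contains _ _ hc2, hk]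
      · exact PySem.Dict.nodup_keys_insert _ _ _ hnd
      · exact (PySem.Dict.mem_keys_insert _ _ _ _).mpr (Or.inr hm)
      · intro k
        rw [PySem.Dict.getD_insert, PySem.Dict.getD_insert, hg k, hg c']
        by_cases h1 : k = c'
        · subst h1; rw [if_pos rfl, if_pos rfl]; split_ifs <;> omega
        · rw [if_neg h1, if_neg h1]

lemma derive_bump (d : PySem.Dict String Int) (c : String) (hnd : d.keys.Nodup) :
    derive (bump d c) = (match CWE_OWASP.get? c with
      | some cat => (derive d).insert cat ((derive d).getD cat 0 + 1)
      | none => derive d) := by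
  simp only [derive, bump]
  by_cases hc : d.contains c = true
  · obtain ⟨v, hv⟩ : ∃ v, d.get? c = some v := by
      have h := PySem.Dict.contains_eq_isSome_get? d c
      rw [hc] at h
      exact Option.isSome_iff_exists.mp h.symm
    have hgd : d.getD c 0 = v := PySem.Dict.getD_of_get?_eq_some d 0 hv
    have hmem : (c, v) ∈ d.items := PySem.Dict.mem_items_of_get?_eq_some d hv
    obtain ⟨l1, l2, hsplit⟩ := List.append_of_mem hmem
    have hkd : d.keys = d.items.map Prod.fst := rfl
    have hnd' : (l1.map Prod.fst ++ c :: l2.map Prod.fst).Nodup := by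
      have := hnd
      rw [hkd, hsplit] at this
      simpa using this
    have hcl1 : c ∉ l1.map Prod.fst := fun hmem1 =>
      (List.disjoint_of_nodup_append hnd') hmem1 List.mem_cons_self
    have hcl2 : c ∉ l2.map Prod.fst := by
      have h2 := (List.nodup_append.mp hnd').2.1
      exact (List.nodup_cons.mp h2).1
    have hmap : ∀ (l : List (String × Int)), c ∉ l.map Prod.fst →
        List.map (fun p => if (p.1 == c) = true then (c, d.getD c 0 + 1) else p) l = l := by
      intro l
      induction l with
      | nil => intro _; rfl
      | cons q t iht =>
        intro hnc
        simp only [List.map_cons] at hnc ⊢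
        have h1 : ¬(q.1 = c) := fun e => hnc (by simp [e])
        rw [if_neg (by simpa using h1), iht (fun h => hnc (by simp [h]))]
    have hit : (d.insert c (d.getD c 0 + 1)).items = l1 ++ (c, v + 1) :: l2 := by
      rw [PySem.Dict.items_insert_of_contains _ _ hc, hsplit, List.map_append, List.map_cons]
      rw [hmap l1 hcl1, hmap l2 hcl2]
      simp [hgd]
    rw [hit, hsplit, List.foldl_append, List.foldl_append, List.foldl_cons, List.foldl_cons]
    have hPnd : (l1.foldl bOwaspStep PySem.Dict.empty).keys.Nodup :=
      nodup_foldl_bOwaspStep l1 PySem.Dict.empty PySem.Dict.nodup_keys_empty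
    cases hcat : CWE_OWASP.get? c with
    | none => simp only [bOwaspStep, hcat]
    | some cat =>
      simp only [bOwaspStep, hcat]
      set P := l1.foldl bOwaspStep PySem.Dict.empty with hP
      obtain ⟨hk, hnd2, hm, hgr⟩ := R_fold l2 (P.insert cat (P.getD cat 0 + v)) (P.insert cat (P.getD cat 0 + (v + 1))) cat
        (by
          by_cases hpc : P.contains cat = true
          · rw [PySem.Dict.keys_insert_of_contains _ _ hpc, PySem.Dict.keys_insert_of_contains _ _ hpc]
          · have hpc' : P.contains cat = false := by simpa using hpc
            rw [PySem.Dict.keys_insert_of_not_contains _ _ hpc', PySem.Dict.keys_insert_of_not_contains _ _ hpc'])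
        (PySem.Dict.nodup_keys_insert _ _ _ hPnd)
        ((PySem.Dict.mem_keys_insert _ _ _ _).mpr (Or.inl rfl))
        (by
          intro k
          rw [PySem.Dict.getD_insert, PySem.Dict.getD_insert]
          split_ifs <;> omega)
      have hFc : (l2.foldl bOwaspStep (P.insert cat (P.getD cat 0 + v))).contains cat = true :=
        (PySem.Dict.contains_iff_mem_keys _ _).mpr hm
      apply dict_eq_of
      · rw [PySem.Dict.keys_insert_of_contains _ _ hFc]
        exact hk.symm
      · exact hk ▸ hnd2
      · intro k
        rw [hgr k, PySem.Dict.getD_insert]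
        split_ifs with h
        · subst h; omega
        · omega
  · have hc' : d.contains c = false := by simpa using hc
    have h0 : d.getD c 0 = 0 := PySem.Dict.getD_of_not_contains d 0 hc'
    rw [PySem.Dict.items_insert_of_not_contains _ _ hc', List.foldl_append, h0]
    simp only [List.foldl_cons, List.foldl_nil]
    cases hcat : CWE_OWASP.get? c with
    | none => simp [bOwaspStep, hcat]
    | some cat => simp [bOwaspStep, hcat]

lemma A_inv (fs : List (List (String × String))) :
    ∀ d : PySem.Dict String Int, d.keys.Nodup →
      fs.foldl aStep (derive d, d) = (derive (fs.foldl cstep d), fs.foldl cstep d) := by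
  induction fs with
  | nil => intro d _; rfl
  | cons f t ih =>
    intro d hnd
    simp only [List.foldl_cons]
    by_cases hc : pyGetCwe f ≠ ""
    · have hcs : cstep d f = bump d (pyGetCwe f) := by
        simp only [cstep]; rw [if_pos hc]
      have hstep : aStep (derive d, d) f = (derive (bump d (pyGetCwe f)), bump d (pyGetCwe f)) := by
        have hdb := derive_bump d (pyGetCwe f) hnd
        simp only [aStep]
        rw [if_pos hc]
        cases hg : CWE_OWASP.get? (pyGetCwe f) with
        | none =>
          simp only [hg] at hdb
          rw [hdb]
          rfl
        | some cat =>
          have hcat := owasp_val_ne _ _ hg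
          simp only [hg] at hdb
          rw [hdb]
          show (if cat ≠ "" then
              ((derive d).insert cat ((derive d).getD cat 0 + 1),
                d.insert (pyGetCwe f) (d.getD (pyGetCwe f) 0 + 1))
            else (derive d, d.insert (pyGetCwe f) (d.getD (pyGetCwe f) 0 + 1)))
            = ((derive d).insert cat ((derive d).getD cat 0 + 1), bump d (pyGetCwe f))
          rw [if_pos hcat]
          rfl
      rw [hstep, ← hcs]
      have hnd2 : (cstep d f).keys.Nodup := by
        rw [hcs]
        exact PySem.Dict.nodup_keys_insert _ _ _ hnd
      exact ih (cstep d f) hnd2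
    · have hc0 : aStep (derive d, d) f = (derive d, d) := by
        simp only [aStep]; rw [if_neg hc]
      have hcs : cstep d f = d := by simp only [cstep]; rw [if_neg hc]
      rw [hc0, hcs]
      exact ih d hnd

lemma colStep_shift (fs : List (List (String × String))) :
    ∀ acc, fs.foldl colStep acc = acc ++ fs.foldl colStep [] := by
  induction fs with
  | nil => simp
  | cons f t ih =>
    intro acc
    simp only [List.foldl_cons]
    rw [ih (colStep acc f), ih (colStep [] f)]
    simp only [colStep]
    split_ifs <;> simp

lemma cstep_fold (fs : List (List (String × String))) :
    ∀ d, fs.foldl cstep d = (fs.foldl colStep []).foldl bump d := by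
  induction fs with
  | nil => intro d; rfl
  | cons f t ih =>
    intro d
    simp only [List.foldl_cons]
    rw [ih, colStep_shift t (colStep [] f), List.foldl_append]
    congr 1
    simp only [cstep, colStep]
    split_ifs <;> rfl

lemma bump_fold (l : List String) : l.foldl bump PySem.Dict.empty = PySem.Dict.counter l := by
  rw [← PySem.Dict.foldl_insert_getD_add_one_eq_counter]
  rfl

lemma getD_foldl_insert_const (g : String → Int) (l : List String) :
    ∀ (d : PySem.Dict String Int) (k : String),
      (l.foldl (fun d c => d.insert c (g c)) d).getD k 0 = if k ∈ l then g k else d.getD k 0 := by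
  induction l with
  | nil => intro d k; simp
  | cons c t ih =>
    intro d k
    simp only [List.foldl_cons]
    rw [ih, PySem.Dict.getD_insert]
    by_cases h1 : k ∈ t
    · simp [h1, List.mem_cons]
    · by_cases h2 : k = c <;> simp [h1, h2, List.mem_cons]

lemma cwe_hits_eq_counter (cwes : List String) :
    cwes.foldl (fun (d : PySem.Dict String Int) c =>
      d.insert c ((cwes.count c : Nat) : Int)) PySem.Dict.empty = PySem.Dict.counter cwes := by
  have hkeys : (cwes.foldl (fun (d : PySem.Dict String Int) c =>
      d.insert c ((cwes.count c : Nat) : Int)) PySem.Dict.empty).keys = PySem.Set.ofList cwes := by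
    rw [show (cwes.foldl (fun (d : PySem.Dict String Int) c =>
        d.insert c ((cwes.count c : Nat) : Int)) PySem.Dict.empty).keys
        = PySem.Set.update PySem.Dict.empty.keys cwes from
      PySem.Dict.keys_foldl_insert cwes (fun _ c => ((cwes.count c : Nat) : Int)) PySem.Dict.empty]
    rw [PySem.Dict.keys_empty, PySem.Set.update_nil_left]
  apply dict_eq_of
  · rw [hkeys, ← PySem.Dict.keys_counter]
  · rw [hkeys]
    exact PySem.Set.nodup_ofList cwes
  · intro k
    rw [getD_foldl_insert_const, PySem.Dict.getD_counter, PySem.Dict.getD_empty]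
    by_cases h : k ∈ cwes
    · simp [h]
    · simp [h, List.count_eq_zero_of_not_mem h]

-- ===== VERDICT (by name: the statement is the Claim_ definition above) =====
theorem build_compliance_spec : Claim_equal_build_compliance := by
  intro findings _
  show build_compliance findings = build_compliance_alt findings
  have hA := A_inv findings PySem.Dict.empty PySem.Dict.nodup_keys_empty
  rw [show derive PySem.Dict.empty = PySem.Dict.empty from rfl] at hA
  have hcol : (fun (acc : List String) (f : List (String × String)) =>
      let c := pyGetCwe f
      if c ≠ "" then acc ++ [c] else acc) = colStep := rfl
  have hD := cstep_fold findings PySem.Dict.empty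
  have hbf := bump_fold (findings.foldl colStep [])
  have hB := cwe_hits_eq_counter (findings.foldl colStep [])
  simp only [build_compliance, build_compliance_alt]
  rw [hcol, hA, hD, hbf, hB]
  rw [PySem.List.foldl_append_if_eq_filter (fun (kv : String × Int) => CWE_TOP25.contains kv.1)
    (PySem.Dict.counter (findings.foldl colStep [])).items []]
  simp only [List.nil_append]
  rfl
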